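-- pv_equiv track=rewrite | github.com/LT-Intro-To-AI-SY2425/a1-intro-to-python-Yonatan-Joffe | a1.py | duck_duck_goose
-- ===== SOURCE A (Python) =====
-- from typing import List, TypeVar
--
-- def duck_duck_goose(lst: List[str]) -> List[str]:
--     """Given an list of names (strings), play 'duck duck goose' with it, knocking out
--     every third name (wrapping around) until only two names are left.
--
--     In other words, when you hit the end of the list, wrap around and keep counting from
--     where you were.
--
--     For example, if given this list ['Nathan', 'Sasha', 'Sara', 'Jennie'], you'd first
--     knock out Sara. Then first 'duck' on Jennie, wrap around to 'duck' on Nathan and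
--     'goose' on Sasha - knocking him out and leaving only Nathan and Jennie.
--
--     You may assume the list has 3+ names to start
--
--     Args:
--         lst - a list of names (strings)
--
--     Returns:
--         the resulting list after playing duck duck goose
--     """
--     i = 0
--     current = "duck1"
--     while len(lst) > 2:
--         if current == "duck1":
--             current = "duck2"
--             i += 1
--         elif current == "duck2":
--             current = "goose"
--             i += 1
--         else:
--             current = "duck1"
--             lst.pop(i)
--
--         # wrap around if we get to the end
--         if i == len(lst):
--             i = 0
--     return lst
--     raise NotImplementedError("duck_duck_goose")
-- ===== SOURCE B (Python) =====
-- def duck_duck_goose(lst):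
--     """Josephus closed recurrence (k=3, 2 survivors): track both survivors'
--     positions through the standard (p+3) % m recurrence, then keep exactly
--     those two indices in one pass. Returns a new list (A mutates in place)."""
--     n = len(lst)
--     if n <= 2:
--         return lst
--     a, b = 0, 1
--     for m in range(3, n + 1):
--         a = (a + 3) % m
--         b = (b + 3) % m
--     return [x for j, x in enumerate(lst) if j == a or j == b]
-- ===== Notes on version B (the rewrite author's own statement) =====
-- stated objective: faster
-- what changed: Replaces the O(n^2) in-place simulation (repeated list.pop of every third name) by the closed Josephus recurrence p -> (p+3) % m run for both survivors, followed by a single filtering pass that keeps exactly those two indices.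
import Mathlib
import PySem

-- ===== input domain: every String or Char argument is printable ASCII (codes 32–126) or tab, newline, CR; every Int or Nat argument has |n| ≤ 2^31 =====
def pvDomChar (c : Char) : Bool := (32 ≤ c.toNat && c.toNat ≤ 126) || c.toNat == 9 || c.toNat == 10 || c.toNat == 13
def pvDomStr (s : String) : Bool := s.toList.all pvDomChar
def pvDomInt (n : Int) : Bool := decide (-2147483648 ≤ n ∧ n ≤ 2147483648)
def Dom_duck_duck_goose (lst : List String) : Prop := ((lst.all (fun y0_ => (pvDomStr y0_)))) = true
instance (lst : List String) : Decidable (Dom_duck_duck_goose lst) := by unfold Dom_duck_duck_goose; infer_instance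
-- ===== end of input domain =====

-- B replaces A's quadratic pop-every-third simulation by the closed Josephus recurrence
-- (p+3) % m for the two survivors plus one filtering pass; equivalence is about the RETURN
-- value (A also mutates its argument list in place; B does not).

-- ===== PORT A =====
-- measure for A's while loop: the phase string 'current' cycles duck1 → duck2 → goose → pop
def duckRank (c : String) : Nat := if c = "duck1" then 2 else if c = "duck2" then 1 else 0

def duckLoop (lst : List String) (i : Int) (current : String) : List String :=
  if _h : 2 < lst.length then
    if current = "duck1" then
      duckLoop lst (if i + 1 = (lst.length : Int) then 0 else i + 1) "duck2"
    else if current = "duck2" then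
      duckLoop lst (if i + 1 = (lst.length : Int) then 0 else i + 1) "goose"
    else
      match hp : PySem.List.pop? lst i with
      | some r => duckLoop r.2 (if i = (r.2.length : Int) then 0 else i) "duck1"
      | none => lst
  else lst
termination_by (lst.length, duckRank current)
decreasing_by
  · apply Prod.Lex.right; simp [duckRank, *]
  · apply Prod.Lex.right; simp [duckRank, *]
  · apply Prod.Lex.left
    have := PySem.List.length_of_pop?_eq_some lst hp
    omega

def duck_duck_goose (lst : List String) : List String := duckLoop lst 0 "duck1"

-- ===== PORT B =====
def duck_duck_goose_alt (lst : List String) : List String :=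
  let n : Int := lst.length
  if n ≤ 2 then lst
  else
    let ab := (PySem.List.pyRange 3 (n + 1) 1).foldl
      (fun (ab : Int × Int) m => (PySem.Int.mod (ab.1 + 3) m, PySem.Int.mod (ab.2 + 3) m))
      ((0 : Int), (1 : Int))
    ((PySem.List.enumerate lst 0).filter (fun jx => jx.1 == ab.1 || jx.1 == ab.2)).map (·.2)

-- ===== PRECONDITION & SPEC =====
def Spec_duck_duck_goose (lst : List String) (out : List String) : Prop := out = duck_duck_goose_alt lst
instance (lst : List String) (out : List String) : Decidable (Spec_duck_duck_goose lst out) := by unfold Spec_duck_duck_goose; infer_instance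

-- ===== CLAIM (what is proved, stated in full; the proofs are below) =====
def Claim_equal_duck_duck_goose : Prop := ∀ (lst : List String), Dom_duck_duck_goose lst → Spec_duck_duck_goose lst (duck_duck_goose lst)

-- ===== LEMMAS AND PROOFS =====

def s : Nat → Nat → Nat
  | 0, b => b
  | 1, b => b
  | 2, b => b
  | (m + 3), b => (s (m + 2) b + 3) % (m + 3)

lemma s_succ (m : Nat) (h : 2 ≤ m) (b : Nat) : s (m + 1) b = (s m b + 3) % (m + 1) := by
  match m, h with
  | (k + 2), _ => rfl

lemma s_lt (m b : Nat) (hb : b < 2) (hm : 2 ≤ m) : s m b < m := by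
  induction m with
  | zero => omega
  | succ m ih =>
    by_cases h : 2 ≤ m
    · rw [s_succ m h b]; exact Nat.mod_lt _ (by omega)
    · interval_cases m <;> simp [s] <;> omega

def lift (j q : Nat) : Nat := if q < j then q else q + 1

lemma mod_small_cases (x m : Nat) (h : x < 2 * m) (_hm : 0 < m) :
    x % m = if x < m then x else x - m := by
  split
  · exact Nat.mod_eq_of_lt ‹_›
  · rw [Nat.mod_eq_sub_mod (by omega), Nat.mod_eq_of_lt (by omega)]

lemma s_ne (m : Nat) (hm : 2 ≤ m) : s m 0 ≠ s m 1 := by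
  induction m with
  | zero => omega
  | succ m ih =>
    by_cases h : 2 ≤ m
    · have h0 := s_lt m 0 (by omega) h
      have h1 := s_lt m 1 (by omega) h
      have ihne := ih h
      rw [s_succ m h 0, s_succ m h 1]
      rw [mod_small_cases _ _ (by omega) (by omega), mod_small_cases _ _ (by omega) (by omega)]
      split_ifs <;> omega
    · interval_cases m <;> simp [s]

lemma lift_eq (m j c : Nat) (hm : 3 ≤ m) (hj : j < m) (hc : c < m - 1) :
    lift j ((c + j % (m - 1)) % (m - 1)) = (c + j + 1) % m := by
  unfold lift
  rw [mod_small_cases j (m - 1) (by omega) (by omega)]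
  rw [mod_small_cases (c + j + 1) m (by omega) (by omega)]
  by_cases h1 : j < m - 1
  · rw [if_pos h1, mod_small_cases _ _ (by omega) (by omega)]
    split_ifs <;> omega
  · rw [if_neg h1, mod_small_cases _ _ (by omega) (by omega)]
    split_ifs <;> omega

lemma lift_min (j a b : Nat) : min (lift j a) (lift j b) = lift j (min a b) := by
  unfold lift; split_ifs <;> omega

lemma lift_max (j a b : Nat) : max (lift j a) (lift j b) = lift j (max a b) := by
  unfold lift; split_ifs <;> omega

lemma getD_eraseIdx (xs : List String) (j q : Nat) (_hj : j < xs.length)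
    (_hq : q < xs.length - 1) : (xs.eraseIdx j).getD q "" = xs.getD (lift j q) "" := by
  unfold lift
  rw [List.getD_eq_getElem?_getD, List.getD_eq_getElem?_getD, List.getElem?_eraseIdx]
  split_ifs with h <;> simp

def g (xs : List String) (i : Nat) : List String :=
  if h : xs.length ≤ 2 then xs
  else
    g (xs.eraseIdx ((i + 2) % xs.length)) (((i + 2) % xs.length) % (xs.length - 1))
termination_by xs.length
decreasing_by
  have hlt : (i + 2) % xs.length < xs.length := Nat.mod_lt _ (by omega)
  simp [List.length_eraseIdx, hlt]
  omega

lemma add_mod_helper (c i n : Nat) (_hn : 0 < n) : (c + (i + 2) % n + 1) % n = (c + 3 + i) % n := by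
  conv_lhs => rw [show c + (i + 2) % n + 1 = (i + 2) % n + (c + 1) by ring]
  rw [Nat.mod_add_mod]
  congr 1
  ring

lemma g_eq (n : Nat) : ∀ (xs : List String) (i : Nat), xs.length = n → 2 ≤ n → i < n →
    g xs i = [xs.getD (min ((s n 0 + i) % n) ((s n 1 + i) % n)) "",
              xs.getD (max ((s n 0 + i) % n) ((s n 1 + i) % n)) ""] := by
  induction n using Nat.strong_induction_on with
  | _ n IH =>
    intro xs i hlen h2 hi
    by_cases h3 : n ≤ 2
    · have hn2 : n = 2 := by omega
      subst hn2
      rw [g, dif_pos (by omega)]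
      match xs, hlen with
      | [a, b], _ =>
        interval_cases i <;> simp [s, List.getD]
    · -- n ≥ 3
      have hn3 : 3 ≤ n := by omega
      have hn0 : 0 < n := by omega
      set j := (i + 2) % n with hjdef
      have hj : j < n := Nat.mod_lt _ hn0
      rw [g, dif_neg (by omega)]
      rw [hlen, ← hjdef]
      have hlen' : (xs.eraseIdx j).length = n - 1 := by
        rw [List.length_eraseIdx, hlen, if_pos hj]
      have hrec := IH (n - 1) (by omega) (xs.eraseIdx j) (j % (n - 1)) hlen' (by omega)
        (Nat.mod_lt _ (by omega))
      rw [hrec]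
      have c0lt := s_lt (n - 1) 0 (by omega) (by omega)
      have c1lt := s_lt (n - 1) 1 (by omega) (by omega)
      have u'lt : (s (n - 1) 0 + j % (n - 1)) % (n - 1) < n - 1 := Nat.mod_lt _ (by omega)
      have v'lt : (s (n - 1) 1 + j % (n - 1)) % (n - 1) < n - 1 := Nat.mod_lt _ (by omega)
      rw [getD_eraseIdx xs j _ (by omega) (by rw [hlen]; omega),
          getD_eraseIdx xs j _ (by omega) (by rw [hlen]; omega)]
      rw [← lift_min, ← lift_max]
      rw [lift_eq n j (s (n - 1) 0) hn3 hj c0lt, lift_eq n j (s (n - 1) 1) hn3 hj c1lt]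
      have hs : ∀ b, s n b = (s (n - 1) b + 3) % n := by
        intro b
        have h := s_succ (n - 1) (by omega) b
        rwa [show n - 1 + 1 = n by omega] at h
      have hb : ∀ b, (s (n - 1) b + j + 1) % n = (s n b + i) % n := by
        intro b
        rw [hjdef, add_mod_helper _ _ _ hn0, hs b, Nat.mod_add_mod]
      rw [hb 0, hb 1]

lemma duckLoop_eq_g (n : Nat) : ∀ (xs : List String) (i : Nat), xs.length = n →
    (n ≤ 2 ∨ i < n) → duckLoop xs (i : Int) "duck1" = g xs i := by
  induction n using Nat.strong_induction_on with
  | _ n IH =>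
    intro xs i hlen hcase
    by_cases h3 : n ≤ 2
    · rw [duckLoop, dif_neg (by omega), g, dif_pos (by omega)]
    · have hi : i < n := by omega
      have hn0 : 0 < n := by omega
      -- step 1: duck1
      rw [duckLoop, dif_pos (by omega), if_pos rfl]
      set i1 : Nat := if i + 1 = n then 0 else i + 1 with hi1
      have hi1c : (if (i : Int) + 1 = (xs.length : Int) then 0 else (i : Int) + 1) = (i1 : Int) := by
        rw [hlen, hi1]; split_ifs <;> push_cast <;> omega
      rw [hi1c]
      have hi1lt : i1 < n := by rw [hi1]; split_ifs <;> omega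
      -- step 2: duck2
      rw [duckLoop, dif_pos (by omega), if_neg (by decide), if_pos rfl]
      set i2 : Nat := if i1 + 1 = n then 0 else i1 + 1 with hi2
      have hi2c : (if (i1 : Int) + 1 = (xs.length : Int) then 0 else (i1 : Int) + 1) = (i2 : Int) := by
        rw [hlen, hi2]; split_ifs <;> push_cast <;> omega
      rw [hi2c]
      have hi2lt : i2 < n := by rw [hi2]; split_ifs <;> omega
      -- step 3: goose (pop)
      rw [duckLoop, dif_pos (by omega), if_neg (by decide), if_neg (by decide)]
      have hpop := PySem.List.pop?_natCast (xs := xs) (n := i2) (by omega)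
      split
      case _ r hp =>
        rw [hp] at hpop
        have hr : r = (xs[i2], xs.eraseIdx i2) := Option.some_inj.mp hpop
        subst hr
        have hleneq : (xs.eraseIdx i2).length = n - 1 := by
          rw [List.length_eraseIdx, hlen, if_pos (by omega)]
        set i3 : Nat := if i2 = n - 1 then 0 else i2 with hi3
        have hi3c : (if (i2 : Int) = (((xs.eraseIdx i2).length : Nat) : Int) then 0 else (i2 : Int)) = (i3 : Int) := by
          rw [hleneq, hi3]; split_ifs <;> push_cast <;> omega
        rw [hi3c]
        have hi2eq : i2 = (i + 2) % n := by
          rw [mod_small_cases _ _ (by omega) hn0, hi2, hi1]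
          split_ifs <;> omega
        have hi3eq : i3 = i2 % (n - 1) := by
          rw [mod_small_cases _ _ (by omega) (by omega), hi3]
          split_ifs <;> omega
        rw [g, dif_neg (by omega)]
        simp only [hlen]
        rw [← hi2eq, ← hi3eq]
        exact IH (n - 1) (by omega) _ i3 hleneq (by rw [hi3]; split_ifs <;> omega)
      case _ hp =>
        rw [hp] at hpop
        exact absurd hpop (by simp)

lemma fold_s (n : Nat) (h : 2 ≤ n) :
    (PySem.List.pyRange 3 ((n : Int) + 1) 1).foldl
      (fun (ab : Int × Int) m => (PySem.Int.mod (ab.1 + 3) m, PySem.Int.mod (ab.2 + 3) m))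
      ((0 : Int), (1 : Int)) = ((s n 0 : Int), (s n 1 : Int)) := by
  induction n with
  | zero => omega
  | succ n ih =>
    by_cases h2 : 2 ≤ n
    · have hcast : ((n + 1 : Nat) : Int) + 1 = ((n : Int) + 1) + 1 := by push_cast; ring
      rw [hcast, PySem.List.pyRange_one_succ_right (by omega), List.foldl_append, ih h2]
      simp only [List.foldl_cons, List.foldl_nil]
      have hm : ∀ b, b < 2 → PySem.Int.mod ((s n b : Int) + 3) ((n : Int) + 1) = ((s (n + 1) b : Nat) : Int) := by
        intro b hb
        have e1 : ((s n b : Int) + 3) = ((s n b + 3 : Nat) : Int) := by push_cast; ring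
        have e2 : ((n : Int) + 1) = ((n + 1 : Nat) : Int) := by push_cast; ring
        rw [e1, e2, PySem.Int.mod_natCast, s_succ n h2 b]
      rw [hm 0 (by omega), hm 1 (by omega)]
    · have hn : n = 1 := by omega
      subst hn
      decide

lemma range_filter_single (n u : Nat) :
    (List.range n).filter (fun k => k == u) = if u < n then [u] else [] := by
  induction n with
  | zero => simp
  | succ n ih =>
    rw [List.range_succ, List.filter_append, ih]
    by_cases h : u < n
    · rw [if_pos h, if_pos (by omega)]
      simp [Nat.ne_of_gt h]
    · by_cases h2 : u = n
      · subst h2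
        simp
      · rw [if_neg h, if_neg (by omega)]
        simp
        omega

lemma range_filter_pair (u v n : Nat) (huv : u < v) (hv : v < n) :
    (List.range n).filter (fun k => k == u || k == v) = [u, v] := by
  induction n with
  | zero => omega
  | succ n ih =>
    rw [List.range_succ, List.filter_append]
    by_cases h : v < n
    · rw [ih h]
      simp [Nat.ne_of_gt (by omega : u < n), Nat.ne_of_gt h]
    · have hvn : v = n := by omega
      subst hvn
      have heq : (List.range v).filter (fun k => k == u || k == v) =
          (List.range v).filter (fun k => k == u) := by
        apply List.filter_congr
        intro k hk
        have : k < v := List.mem_range.mp hk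
        simp [Nat.ne_of_lt this]
      rw [heq, range_filter_single, if_pos huv]
      simp

lemma enum_filter_lt (xs : List String) (u v : Nat) (hv : v < xs.length) (huv : u < v) :
    ((PySem.List.enumerate xs 0).filter (fun jx => jx.1 == (u : Int) || jx.1 == (v : Int))).map (·.2)
      = [xs.getD u "", xs.getD v ""] := by
  rw [PySem.List.enumerate_eq_map_pyRange xs ""]
  rw [show PySem.List.len xs = ((xs.length : Nat) : Int) from rfl]
  rw [PySem.List.pyRange_zero_natCast, List.map_map, List.filter_map]
  have hpred : ((fun jx : Int × String => jx.1 == (u : Int) || jx.1 == (v : Int)) ∘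
      ((fun j => (j, PySem.List.pyGetD xs j "")) ∘ fun k : Nat => (k : Int))) =
      (fun k : Nat => k == u || k == v) := by
    funext k
    have hc : ∀ w : Nat, ((k : Int) == (w : Int)) = (k == w) := by
      intro w
      rcases Bool.eq_false_or_eq_true (k == w) with h | h <;> rw [h] <;> simp_all
    simp only [Function.comp_apply, hc]
  rw [hpred, range_filter_pair u v xs.length huv hv, List.map_map]
  simp [PySem.List.pyGetD_natCast]

lemma enum_filter (xs : List String) (u v : Nat) (hu : u < xs.length) (hv : v < xs.length)
    (huv : u ≠ v) :
    ((PySem.List.enumerate xs 0).filter (fun jx => jx.1 == (u : Int) || jx.1 == (v : Int))).map (·.2)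
      = [xs.getD (min u v) "", xs.getD (max u v) ""] := by
  rcases Nat.lt_or_ge u v with h | h
  · rw [Nat.min_eq_left (le_of_lt h), Nat.max_eq_right (le_of_lt h)]
    exact enum_filter_lt xs u v hv h
  · have h2 : v < u := by omega
    rw [Nat.min_eq_right (le_of_lt h2), Nat.max_eq_left (le_of_lt h2)]
    have hcomm : (fun jx : Int × String => jx.1 == (u : Int) || jx.1 == (v : Int)) =
        (fun jx : Int × String => jx.1 == (v : Int) || jx.1 == (u : Int)) := by
      funext jx; rw [Bool.or_comm]
    rw [hcomm]
    exact enum_filter_lt xs v u hu h2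

-- ===== VERDICT (by name: the statement is the Claim_ definition above) =====
theorem duck_duck_goose_spec : Claim_equal_duck_duck_goose := by
  intro lst _
  unfold Spec_duck_duck_goose duck_duck_goose duck_duck_goose_alt
  by_cases h : lst.length ≤ 2
  · rw [duckLoop, dif_neg (by omega)]
    simp [h]
  · have hA : duckLoop lst 0 "duck1" = g lst 0 := by
      have := duckLoop_eq_g lst.length lst 0 rfl (Or.inr (by omega))
      simpa using this
    have h0 := s_lt lst.length 0 (by omega) (by omega)
    have h1 := s_lt lst.length 1 (by omega) (by omega)
    rw [hA, g_eq lst.length lst 0 rfl (by omega) (by omega)]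
    rw [if_neg (by omega)]
    rw [fold_s lst.length (by omega)]
    rw [enum_filter lst (s lst.length 0) (s lst.length 1) h0 h1 (s_ne lst.length (by omega))]
    rw [Nat.add_zero, Nat.add_zero, Nat.mod_eq_of_lt h0, Nat.mod_eq_of_lt h1]
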